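-- pv_equiv track=rewrite | github.com/wxhxyyzm/WeatherProject | mysqlutils/extract.py | count_heatwaves
-- ===== SOURCE A (Python) =====
-- def count_heatwaves(temperatures, threshold):
--     # 热浪天气
--     heatwave_counts = {
--         'weak': 0,
--         'medium': 0,
--         'strong': 0
--     }
--     consecutive_days = 0  # 对连续天数进行计数
--     for temp in temperatures:
--         if temp >= threshold:
--             consecutive_days += 1  # 连续天数加一
--         else:
--             # 不连续了，就判断
--             if consecutive_days >= 3 and consecutive_days < 5:
--                 heatwave_counts['weak'] += 1
--             elif consecutive_days >= 5 and consecutive_days < 7: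
--                 heatwave_counts['medium'] += 1
--             elif consecutive_days >= 7:
--                 heatwave_counts['strong'] += 1
--             consecutive_days = 0
--     return heatwave_counts
-- ===== SOURCE B (Python) =====
-- def count_heatwaves(temperatures, threshold):
--     # Pass 1: collect the lengths of completed hot streaks (the trailing
--     # streak is never finalized, matching the original's behaviour).
--     lengths = []
--     run = 0
--     for temp in temperatures:
--         if temp >= threshold:
--             run += 1
--         else:
--             if run > 0:
--                 lengths.append(run)
--             run = 0
--     # Pass 2: classify each length into buckets by cut points 3, 5, 7.
--     # Bucket index 0 (length < 3) is ignored.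
--     counts = [0, 0, 0, 0]
--     for n in lengths:
--         counts[sum(1 for c in (3, 5, 7) if c <= n)] += 1
--     return {'weak': counts[1], 'medium': counts[2], 'strong': counts[3]}
-- ===== Notes on version B (the rewrite author's own statement) =====
-- stated objective: alternative
-- what changed: Replaces A's single loop that classifies each finished streak inline into a dict with a two-pass decomposition: one pass collects completed streak lengths into a list, a second pass classifies each length arithmetically by counting cut points (3,5,7) not exceeding it into an indexed bucket array.
import Mathlib
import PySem

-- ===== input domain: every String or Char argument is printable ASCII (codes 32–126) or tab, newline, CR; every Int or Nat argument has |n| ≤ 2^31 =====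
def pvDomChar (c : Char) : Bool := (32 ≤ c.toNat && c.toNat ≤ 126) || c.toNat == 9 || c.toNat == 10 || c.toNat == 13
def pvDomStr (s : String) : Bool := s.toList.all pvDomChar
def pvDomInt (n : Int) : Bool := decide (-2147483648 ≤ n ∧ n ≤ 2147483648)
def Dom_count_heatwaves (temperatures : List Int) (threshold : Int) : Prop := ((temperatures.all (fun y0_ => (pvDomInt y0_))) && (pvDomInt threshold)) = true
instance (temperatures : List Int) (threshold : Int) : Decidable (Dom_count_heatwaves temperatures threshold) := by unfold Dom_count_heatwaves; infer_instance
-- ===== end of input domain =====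

-- B replaces A's single loop with inline dict updates by two passes (collect
-- completed streak lengths, then classify each length arithmetically into
-- cut-point buckets); objective: alternative decomposition, same cost.

-- ===== PORT A =====
def pvStepA (threshold : Int) (st : PySem.Dict String Int × Int) (temp : Int) :
    PySem.Dict String Int × Int :=
  if temp ≥ threshold then (st.1, st.2 + 1)
  else
    (if 3 ≤ st.2 ∧ st.2 < 5 then st.1.modify "weak" 0 (· + 1)
     else if 5 ≤ st.2 ∧ st.2 < 7 then st.1.modify "medium" 0 (· + 1)
     else if 7 ≤ st.2 then st.1.modify "strong" 0 (· + 1)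
     else st.1, 0)

def count_heatwaves (temperatures : List Int) (threshold : Int) : List (String × Int) :=
  let heatwave_counts : PySem.Dict String Int :=
    PySem.Dict.ofList [("weak", 0), ("medium", 0), ("strong", 0)]
  (temperatures.foldl (pvStepA threshold) (heatwave_counts, 0)).1.items

-- ===== PORT B =====
-- bucket index of a streak length by the cut points 3, 5, 7 (Source B's
-- 'sum(1 for c in (3, 5, 7) if c <= n)')
def pvBucket (n : Int) : Nat := (([3, 5, 7] : List Int).filter (fun c => c ≤ n)).length

def pvStepB (threshold : Int) (st : List Int × Int) (temp : Int) : List Int × Int :=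
  if temp ≥ threshold then (st.1, st.2 + 1)
  else (if st.2 > 0 then st.1 ++ [st.2] else st.1, 0)

def pvStepC (cs : List Int) (n : Int) : List Int :=
  cs.set (pvBucket n) (cs[pvBucket n]! + 1)

def count_heatwaves_alt (temperatures : List Int) (threshold : Int) : List (String × Int) :=
  let lengths := (temperatures.foldl (pvStepB threshold) ([], 0)).1
  let counts := lengths.foldl pvStepC [0, 0, 0, 0]
  [("weak", counts[1]!), ("medium", counts[2]!), ("strong", counts[3]!)]

-- ===== PRECONDITION & SPEC =====
def Spec_count_heatwaves (temperatures : List Int) (threshold : Int) (out : List (String × Int)) : Prop := out = count_heatwaves_alt temperatures threshold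
instance (temperatures : List Int) (threshold : Int) (out : List (String × Int)) : Decidable (Spec_count_heatwaves temperatures threshold out) := by unfold Spec_count_heatwaves; infer_instance

-- ===== CLAIM (what is proved, stated in full; the proofs are below) =====
def Claim_equal_count_heatwaves : Prop := ∀ (temperatures : List Int) (threshold : Int), Dom_count_heatwaves temperatures threshold → Spec_count_heatwaves temperatures threshold (count_heatwaves temperatures threshold)

-- ===== LEMMAS AND PROOFS =====

-- the list of completed hot-streak lengths (the trailing streak is dropped)
def pvRuns (threshold : Int) : List Int → Int → List Int
  | [], _ => []
  | t :: ts, c =>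
    if t ≥ threshold then pvRuns threshold ts (c + 1)
    else (if c > 0 then [c] else []) ++ pvRuns threshold ts 0

-- how many collected lengths fall into bucket k
def pvCnt (k : Nat) (L : List Int) : Int := ((L.filter (fun n => pvBucket n = k)).length : Int)

theorem pvBucket_eq (n : Int) :
    pvBucket n = if 7 ≤ n then 3 else if 5 ≤ n then 2 else if 3 ≤ n then 1 else 0 := by
  unfold pvBucket
  by_cases h7 : 7 ≤ n
  · simp [List.filter, h7, show (3:Int) ≤ n by omega, show (5:Int) ≤ n by omega]
  · by_cases h5 : 5 ≤ n
    · simp [List.filter, h7, h5, show (3:Int) ≤ n by omega]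
    · by_cases h3 : 3 ≤ n <;> simp [List.filter, h7, h5, h3]

theorem pvCnt_nil (k : Nat) : pvCnt k [] = 0 := rfl

theorem pvCnt_cons (k : Nat) (n : Int) (L : List Int) :
    pvCnt k (n :: L) = (if pvBucket n = k then 1 else 0) + pvCnt k L := by
  simp only [pvCnt, List.filter_cons]
  split_ifs with h <;> simp_all <;> omega

theorem pvCnt_append (k : Nat) (L M : List Int) :
    pvCnt k (L ++ M) = pvCnt k L + pvCnt k M := by
  simp [pvCnt, List.filter_append]

theorem pvB_collect (threshold : Int) (ts : List Int) (acc : List Int) (c : Int) :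
    (ts.foldl (pvStepB threshold) (acc, c)).1 = acc ++ pvRuns threshold ts c := by
  induction ts generalizing acc c with
  | nil => simp [pvRuns]
  | cons t ts ih =>
    simp only [List.foldl_cons, pvStepB, pvRuns]
    by_cases h : t ≥ threshold
    · simp [h, ih]
    · by_cases h2 : c > 0 <;> simp [h, h2, ih]

theorem pvB_counts (L : List Int) (a b c d : Int) :
    L.foldl pvStepC [a, b, c, d] =
      [a + pvCnt 0 L, b + pvCnt 1 L, c + pvCnt 2 L, d + pvCnt 3 L] := by
  induction L generalizing a b c d with
  | nil => simp [pvCnt]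
  | cons n L ih =>
    have hlt : pvBucket n < 4 := by rw [pvBucket_eq]; split_ifs <;> omega
    simp only [List.foldl_cons, pvStepC]
    interval_cases h : pvBucket n <;>
      simp [h, ih, pvCnt_cons, List.set] <;> omega

theorem pvModify_weak (w m s : Int) :
    (PySem.Dict.mk [("weak", w), ("medium", m), ("strong", s)]).modify "weak" 0 (· + 1) =
      PySem.Dict.mk [("weak", w + 1), ("medium", m), ("strong", s)] := by
  apply PySem.Dict.ext
  simp [PySem.Dict.modify, PySem.Dict.getD, PySem.Dict.get?, PySem.Dict.insert,
    PySem.Dict.contains]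

theorem pvModify_medium (w m s : Int) :
    (PySem.Dict.mk [("weak", w), ("medium", m), ("strong", s)]).modify "medium" 0 (· + 1) =
      PySem.Dict.mk [("weak", w), ("medium", m + 1), ("strong", s)] := by
  apply PySem.Dict.ext
  simp [PySem.Dict.modify, PySem.Dict.getD, PySem.Dict.get?, PySem.Dict.insert,
    PySem.Dict.contains]

theorem pvModify_strong (w m s : Int) :
    (PySem.Dict.mk [("weak", w), ("medium", m), ("strong", s)]).modify "strong" 0 (· + 1) =
      PySem.Dict.mk [("weak", w), ("medium", m), ("strong", s + 1)] := by
  apply PySem.Dict.ext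
  simp [PySem.Dict.modify, PySem.Dict.getD, PySem.Dict.get?, PySem.Dict.insert,
    PySem.Dict.contains]

theorem pvA_fold (threshold : Int) (ts : List Int) (w m s c : Int) (hc : 0 ≤ c) :
    (ts.foldl (pvStepA threshold) (PySem.Dict.mk [("weak", w), ("medium", m), ("strong", s)], c)).1 =
      PySem.Dict.mk [("weak", w + pvCnt 1 (pvRuns threshold ts c)),
                     ("medium", m + pvCnt 2 (pvRuns threshold ts c)),
                     ("strong", s + pvCnt 3 (pvRuns threshold ts c))] := by
  induction ts generalizing w m s c with
  | nil => simp [pvRuns, pvCnt]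
  | cons t ts ih =>
    simp only [List.foldl_cons, pvStepA, pvRuns]
    by_cases ht : t ≥ threshold
    · rw [if_pos ht, if_pos ht, ih w m s (c + 1) (by omega)]
    · rw [if_neg ht, if_neg ht]
      by_cases h1 : 3 ≤ c ∧ c < 5
      · have hb : pvBucket c = 1 := by rw [pvBucket_eq]; split_ifs <;> omega
        have hpos : c > 0 := by omega
        rw [if_pos h1, pvModify_weak, ih (w + 1) m s 0 le_rfl]
        simp [hpos, pvCnt_append, pvCnt_cons, pvCnt_nil, hb,
          PySem.Dict.mk.injEq, List.cons.injEq, Prod.mk.injEq]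
        omega
      · rw [if_neg h1]
        by_cases h2 : 5 ≤ c ∧ c < 7
        · have hb : pvBucket c = 2 := by rw [pvBucket_eq]; split_ifs <;> omega
          have hpos : c > 0 := by omega
          rw [if_pos h2, pvModify_medium, ih w (m + 1) s 0 le_rfl]
          simp [hpos, pvCnt_append, pvCnt_cons, pvCnt_nil, hb,
            PySem.Dict.mk.injEq, List.cons.injEq, Prod.mk.injEq]
          omega
        · rw [if_neg h2]
          by_cases h3 : 7 ≤ c
          · have hb : pvBucket c = 3 := by rw [pvBucket_eq]; split_ifs <;> omega
            have hpos : c > 0 := by omega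
            rw [if_pos h3, pvModify_strong, ih w m (s + 1) 0 le_rfl]
            simp [hpos, pvCnt_append, pvCnt_cons, pvCnt_nil, hb,
              PySem.Dict.mk.injEq, List.cons.injEq, Prod.mk.injEq]
            omega
          · have hb : pvBucket c = 0 := by rw [pvBucket_eq]; split_ifs <;> omega
            rw [if_neg h3, ih w m s 0 le_rfl]
            by_cases hpos : c > 0
            · simp [hpos, pvCnt_cons, hb]
            · simp [hpos]

-- ===== VERDICT (by name: the statement is the Claim_ definition above) =====
theorem count_heatwaves_spec : Claim_equal_count_heatwaves := by
  intro temperatures threshold _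
  unfold Spec_count_heatwaves count_heatwaves count_heatwaves_alt
  have hofl : (PySem.Dict.ofList [("weak", (0:Int)), ("medium", 0), ("strong", 0)]) =
      PySem.Dict.mk [("weak", 0), ("medium", 0), ("strong", 0)] := by decide
  have hA := pvA_fold threshold temperatures 0 0 0 0 le_rfl
  have hB := pvB_collect threshold temperatures [] 0
  simp only [hofl, hA, hB, List.nil_append, pvB_counts]
  simp
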